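-- pv_equiv track=rewrite | github.com/LazyYuYZY/huawei | test_bc.py | refine_eq2_with_fid_majority
-- ===== SOURCE A (Python) =====
-- from collections import defaultdict, Counter
--
-- def refine_eq2_with_fid_majority(eq_1_set, eq_2_set, gt_2_set):
--     """
--     根据 fid 的多数情况，修正子流分类结果
--     """
--     # 使用 defaultdict 初始化一个字典，用于存储每个 fid 对应的子流列表
--     fid_to_subflows = defaultdict(list)
--     # 遍历三个子流集合，将子流按 fid 分组
--     for key in eq_1_set | eq_2_set | gt_2_set:
--         # 提取子流的 fid 部分
--         fid = key // 1000  # int(fid{port:03d}) 提取前部 fid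
--         fid_to_subflows[fid].append(key)
--
--     # 初始化三个集合，用于存储修正后的子流分类结果
--     refined_eq_1 = set()
--     refined_eq_2 = set()
--     refined_gt_2 = set()
--     # 遍历一次上报的子流，修正大流误报为大小为1的小流
--     for key in eq_1_set:
--         # 提取子流的 fid 部分
--         fid = key // 1000
--         # 获取该 fid 对应的子流列表
--         subflows = fid_to_subflows[fid]
--         # 计算该 fid 下大小为1或2的子流数量
--         eq2_count = sum(1 for sf in subflows if sf in eq_1_set or sf in eq_2_set)
--         # 计算该 fid 下大小大于2的子流数量
--         gt2_count = sum(1 for sf in subflows if sf in gt_2_set)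
--
--         if gt2_count > eq2_count:
--             # 若大小大于2的子流数量不少于大小为1或2的子流数量，将该子流归类到 refined_gt_2 集合
--             refined_gt_2.add(key)
--         else:
--             # 否则，将该子流归类到 refined_eq_1 集合
--             refined_eq_1.add(key)
--     # 遍历一次上报的子流，修正大流误报为大小为2的小流
--     for key in eq_2_set:
--         # 提取子流的 fid 部分
--         fid = key // 1000
--         # 获取该 fid 对应的子流列表
--         subflows = fid_to_subflows[fid]
--         # 计算该 fid 下大小为1或2的子流数量
--         eq2_count = sum(1 for sf in subflows if sf in eq_1_set or sf in eq_2_set)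
--         # 计算该 fid 下大小大于2的子流数量
--         gt2_count = sum(1 for sf in subflows if sf in gt_2_set)
--
--         if gt2_count > eq2_count:
--             # 若大小大于2的子流数量不少于大小为1或2的子流数量，将该子流归类到 refined_gt_2 集合
--             refined_gt_2.add(key)
--         else:
--             # 否则，将该子流归类到 refined_eq_2 集合
--             refined_eq_2.add(key)
--     # 遍历一次上报的子流，修正大流误报为大小大于2的小流
--     for key in gt_2_set:
--         # 直接将大小大于2的子流添加到 refined_gt_2 集合
--         refined_gt_2.add(key)
--
--     return refined_eq_1, refined_eq_2, refined_gt_2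
-- ===== SOURCE B (Python) =====
-- def refine_eq2_with_fid_majority(eq_1_set, eq_2_set, gt_2_set):
--     # One pass over the union builds per-fid small/big counters; each key is then
--     # classified by two O(1) dict lookups instead of rescanning its fid's subflow list.
--     eqc = {}
--     gtc = {}
--     for key in eq_1_set | eq_2_set | gt_2_set:
--         fid = key // 1000
--         if key in eq_1_set or key in eq_2_set:
--             eqc[fid] = eqc.get(fid, 0) + 1
--         if key in gt_2_set:
--             gtc[fid] = gtc.get(fid, 0) + 1
--     refined_eq_1, refined_eq_2, refined_gt_2 = set(), set(), set()
--     for key in eq_1_set: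
--         fid = key // 1000
--         if eqc.get(fid, 0) < gtc.get(fid, 0):
--             refined_gt_2.add(key)
--         else:
--             refined_eq_1.add(key)
--     for key in eq_2_set:
--         fid = key // 1000
--         if eqc.get(fid, 0) < gtc.get(fid, 0):
--             refined_gt_2.add(key)
--         else:
--             refined_eq_2.add(key)
--     refined_gt_2 |= gt_2_set
--     return refined_eq_1, refined_eq_2, refined_gt_2
-- ===== Notes on version B (the rewrite author's own statement) =====
-- stated objective: faster
-- what changed: B builds per-fid small/big counters in one pass over the union and classifies each key by two O(1) dict lookups, instead of A's per-key rescan of its fid's whole subflow list with membership tests.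
import Mathlib
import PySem

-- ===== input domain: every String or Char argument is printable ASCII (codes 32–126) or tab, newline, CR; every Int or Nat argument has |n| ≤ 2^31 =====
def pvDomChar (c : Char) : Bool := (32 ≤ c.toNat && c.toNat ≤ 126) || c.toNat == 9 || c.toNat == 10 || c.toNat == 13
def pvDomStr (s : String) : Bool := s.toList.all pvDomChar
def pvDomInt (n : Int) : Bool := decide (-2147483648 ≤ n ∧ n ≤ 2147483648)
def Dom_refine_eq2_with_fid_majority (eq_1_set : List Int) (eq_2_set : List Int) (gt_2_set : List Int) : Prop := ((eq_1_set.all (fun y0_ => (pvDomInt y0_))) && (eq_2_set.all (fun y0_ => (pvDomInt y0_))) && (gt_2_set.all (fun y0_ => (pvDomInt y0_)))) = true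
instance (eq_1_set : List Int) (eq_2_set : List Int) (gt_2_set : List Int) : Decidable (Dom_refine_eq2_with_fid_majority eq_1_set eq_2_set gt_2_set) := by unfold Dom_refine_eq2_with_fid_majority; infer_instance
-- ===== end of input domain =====

-- B replaces A's per-key rescan of its fid's subflow list by two per-fid counters
-- built in one pass over the union; objective: faster (asymptotic).

-- fid extraction, shared by both ports (key // 1000 in both Pythons)
def pvFid (k : Int) : Int := PySem.Int.floordiv k 1000

-- eq_1_set | eq_2_set | gt_2_set, the identical union expression of both Pythons
def pvUnion (eq_1_set eq_2_set gt_2_set : List Int) : List Int :=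
  PySem.Set.union (PySem.Set.union (PySem.Set.ofList eq_1_set) (PySem.Set.ofList eq_2_set)) (PySem.Set.ofList gt_2_set)

-- ===== PORT A =====
def refine_eq2_with_fid_majority (eq_1_set : List Int) (eq_2_set : List Int) (gt_2_set : List Int) : List Int × List Int × List Int :=
  let union := pvUnion eq_1_set eq_2_set gt_2_set
  -- fid_to_subflows: defaultdict(list) grouping loop
  let fid_to_subflows : PySem.Dict Int (List Int) :=
    union.foldl (fun d key => d.modify (pvFid key) [] (fun l => l ++ [key])) PySem.Dict.empty
  -- first loop: keys of eq_1_set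
  let st1 : List Int × List Int × List Int :=
    eq_1_set.foldl (fun acc key =>
      let subflows := fid_to_subflows.getD (pvFid key) []
      let eq2_count : Int := ((subflows.filter (fun sf => eq_1_set.contains sf || eq_2_set.contains sf)).length : Int)
      let gt2_count : Int := ((subflows.filter (fun sf => gt_2_set.contains sf)).length : Int)
      if eq2_count < gt2_count then (acc.1, acc.2.1, PySem.Set.add acc.2.2 key)
      else (PySem.Set.add acc.1 key, acc.2.1, acc.2.2)) ([], [], [])
  -- second loop: keys of eq_2_set
  let st2 : List Int × List Int × List Int :=
    eq_2_set.foldl (fun acc key =>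
      let subflows := fid_to_subflows.getD (pvFid key) []
      let eq2_count : Int := ((subflows.filter (fun sf => eq_1_set.contains sf || eq_2_set.contains sf)).length : Int)
      let gt2_count : Int := ((subflows.filter (fun sf => gt_2_set.contains sf)).length : Int)
      if eq2_count < gt2_count then (acc.1, acc.2.1, PySem.Set.add acc.2.2 key)
      else (acc.1, PySem.Set.add acc.2.1 key, acc.2.2)) st1
  -- third loop: keys of gt_2_set all go to refined_gt_2
  let st3 : List Int × List Int × List Int :=
    gt_2_set.foldl (fun acc key => (acc.1, acc.2.1, PySem.Set.add acc.2.2 key)) st2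
  st3

-- ===== PORT B =====
def refine_eq2_with_fid_majority_alt (eq_1_set : List Int) (eq_2_set : List Int) (gt_2_set : List Int) : List Int × List Int × List Int :=
  let union := pvUnion eq_1_set eq_2_set gt_2_set
  -- one pass over the union building the two per-fid counters (eqc, gtc)
  let counts : PySem.Dict Int Int × PySem.Dict Int Int :=
    union.foldl (fun cs key =>
      (if eq_1_set.contains key || eq_2_set.contains key then cs.1.modify (pvFid key) 0 (· + 1) else cs.1,
       if gt_2_set.contains key then cs.2.modify (pvFid key) 0 (· + 1) else cs.2))
      (PySem.Dict.empty, PySem.Dict.empty)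
  let st1 : List Int × List Int × List Int :=
    eq_1_set.foldl (fun acc key =>
      if counts.1.getD (pvFid key) 0 < counts.2.getD (pvFid key) 0 then (acc.1, acc.2.1, PySem.Set.add acc.2.2 key)
      else (PySem.Set.add acc.1 key, acc.2.1, acc.2.2)) ([], [], [])
  let st2 : List Int × List Int × List Int :=
    eq_2_set.foldl (fun acc key =>
      if counts.1.getD (pvFid key) 0 < counts.2.getD (pvFid key) 0 then (acc.1, acc.2.1, PySem.Set.add acc.2.2 key)
      else (acc.1, PySem.Set.add acc.2.1 key, acc.2.2)) st1
  -- refined_gt_2 |= gt_2_set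
  (st2.1, st2.2.1, PySem.Set.update st2.2.2 gt_2_set)

-- ===== PRECONDITION & SPEC =====
def Spec_refine_eq2_with_fid_majority (eq_1_set : List Int) (eq_2_set : List Int) (gt_2_set : List Int) (out : List Int × List Int × List Int) : Prop := out = refine_eq2_with_fid_majority_alt eq_1_set eq_2_set gt_2_set
instance (eq_1_set : List Int) (eq_2_set : List Int) (gt_2_set : List Int) (out : List Int × List Int × List Int) : Decidable (Spec_refine_eq2_with_fid_majority eq_1_set eq_2_set gt_2_set out) := by unfold Spec_refine_eq2_with_fid_majority; infer_instance

-- ===== CLAIM (what is proved, stated in full; the proofs are below) =====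
def Claim_equal_refine_eq2_with_fid_majority : Prop := ∀ (eq_1_set : List Int) (eq_2_set : List Int) (gt_2_set : List Int), Dom_refine_eq2_with_fid_majority eq_1_set eq_2_set gt_2_set → Spec_refine_eq2_with_fid_majority eq_1_set eq_2_set gt_2_set (refine_eq2_with_fid_majority eq_1_set eq_2_set gt_2_set)

-- ===== LEMMAS AND PROOFS =====

-- an if-guarded fold is the fold over the filtered list
theorem pv_foldl_if {α β : Type} (p : α → Bool) (g : β → α → β) :
    ∀ (l : List α) (b : β),
      l.foldl (fun d x => if p x then g d x else d) b = (l.filter p).foldl g b := by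
  intro l
  induction l with
  | nil => intro b; rfl
  | cons x xs ih =>
    intro b
    by_cases h : p x = true
    · simp [List.foldl_cons, h, ih]
    · simp [List.foldl_cons, h, ih]

-- value of a fid-keyed grouping loop: the matching keys, in list order
theorem pv_getD_group (l : List Int) (f : Int) :
    (l.foldl (fun d key => d.modify (pvFid key) [] (fun s => s ++ [key])) PySem.Dict.empty).getD f [] =
      l.filter (fun k => pvFid k == f) := by
  have hmap := PySem.Dict.getD_foldl_modify_append (l := l.map (fun k => (pvFid k, k)))
      (d := (PySem.Dict.empty : PySem.Dict Int (List Int))) (c := f)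
  simpa [List.foldl_map, List.filter_map, Function.comp_def] using hmap

-- value of an if-guarded counting loop
theorem pv_getD_count (p : Int → Bool) (l : List Int) (f : Int) :
    (l.foldl (fun d key => if p key then d.modify (pvFid key) 0 (· + 1) else d)
        (PySem.Dict.empty : PySem.Dict Int Int)).getD f 0 =
      ((l.filter p).countP (fun k => pvFid k == f) : Int) := by
  rw [pv_foldl_if]
  have h := PySem.Dict.getD_foldl_modify_add_one (l := (l.filter p).map pvFid)
      (d := (PySem.Dict.empty : PySem.Dict Int Int)) (v := f)
  have hc : ((l.filter p).map pvFid).count f = (l.filter p).countP (fun k => pvFid k == f) := by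
    simp [List.count_eq_countP, List.countP_map, Function.comp_def]
  rw [List.foldl_map] at h
  simp [h, hc]

-- B's pair fold splits into the two independent counter folds
theorem pv_counts_split (eq_1_set eq_2_set gt_2_set : List Int) :
    ∀ (l : List Int) (d1 d2 : PySem.Dict Int Int),
      l.foldl (fun cs key =>
          (if eq_1_set.contains key || eq_2_set.contains key then cs.1.modify (pvFid key) 0 (· + 1) else cs.1,
           if gt_2_set.contains key then cs.2.modify (pvFid key) 0 (· + 1) else cs.2)) (d1, d2)
        = (l.foldl (fun d key => if eq_1_set.contains key || eq_2_set.contains key then d.modify (pvFid key) 0 (· + 1) else d) d1,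
           l.foldl (fun d key => if gt_2_set.contains key then d.modify (pvFid key) 0 (· + 1) else d) d2) := by
  intro l
  induction l with
  | nil => intro d1 d2; rfl
  | cons x xs ih => intro d1 d2; simpa using ih _ _

-- A's per-key eq2_count equals B's eqc counter entry
theorem pv_count1 (eq_1_set eq_2_set gt_2_set : List Int) (key : Int) :
    (((((pvUnion eq_1_set eq_2_set gt_2_set).foldl
          (fun d k => d.modify (pvFid k) [] (fun s => s ++ [k])) PySem.Dict.empty).getD (pvFid key) []).filter
            (fun sf => eq_1_set.contains sf || eq_2_set.contains sf)).length : Int)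
      = ((pvUnion eq_1_set eq_2_set gt_2_set).foldl
          (fun d k => if eq_1_set.contains k || eq_2_set.contains k then d.modify (pvFid k) 0 (· + 1) else d)
          PySem.Dict.empty).getD (pvFid key) 0 := by
  rw [pv_getD_group, pv_getD_count]
  simp [List.countP_filter, ← List.countP_eq_length_filter, Bool.and_comm]

-- A's per-key gt2_count equals B's gtc counter entry
theorem pv_count2 (eq_1_set eq_2_set gt_2_set : List Int) (key : Int) :
    (((((pvUnion eq_1_set eq_2_set gt_2_set).foldl
          (fun d k => d.modify (pvFid k) [] (fun s => s ++ [k])) PySem.Dict.empty).getD (pvFid key) []).filter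
            (fun sf => gt_2_set.contains sf)).length : Int)
      = ((pvUnion eq_1_set eq_2_set gt_2_set).foldl
          (fun d k => if gt_2_set.contains k then d.modify (pvFid k) 0 (· + 1) else d)
          PySem.Dict.empty).getD (pvFid key) 0 := by
  rw [pv_getD_group, pv_getD_count]
  simp [List.countP_filter, ← List.countP_eq_length_filter, Bool.and_comm]

-- a fold appending every element to the third component is Set.update there
theorem pv_foldl_third (l : List Int) :
    ∀ (st : List Int × List Int × List Int),
      l.foldl (fun acc key => (acc.1, acc.2.1, PySem.Set.add acc.2.2 key)) st
        = (st.1, st.2.1, PySem.Set.update st.2.2 l) := by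
  induction l with
  | nil => intro st; simp [PySem.Set.update]
  | cons x xs ih => intro st; simpa [PySem.Set.update_cons] using ih _

-- ===== VERDICT (by name: the statement is the Claim_ definition above) =====
theorem refine_eq2_with_fid_majority_spec : Claim_equal_refine_eq2_with_fid_majority := by
  intro eq_1_set eq_2_set gt_2_set _
  unfold Spec_refine_eq2_with_fid_majority
  unfold refine_eq2_with_fid_majority refine_eq2_with_fid_majority_alt
  simp only [pv_counts_split]
  have h1 : (fun (acc : List Int × List Int × List Int) key =>
      if (((((pvUnion eq_1_set eq_2_set gt_2_set).foldl (fun d k => d.modify (pvFid k) [] (fun s => s ++ [k])) PySem.Dict.empty).getD (pvFid key) []).filter (fun sf => eq_1_set.contains sf || eq_2_set.contains sf)).length : Int) < (((((pvUnion eq_1_set eq_2_set gt_2_set).foldl (fun d k => d.modify (pvFid k) [] (fun s => s ++ [k])) PySem.Dict.empty).getD (pvFid key) []).filter (fun sf => gt_2_set.contains sf)).length : Int)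
      then (acc.1, acc.2.1, PySem.Set.add acc.2.2 key)
      else (PySem.Set.add acc.1 key, acc.2.1, acc.2.2))
      = (fun (acc : List Int × List Int × List Int) key =>
      if ((pvUnion eq_1_set eq_2_set gt_2_set).foldl (fun d k => if eq_1_set.contains k || eq_2_set.contains k then d.modify (pvFid k) 0 (· + 1) else d) (PySem.Dict.empty : PySem.Dict Int Int)).getD (pvFid key) 0 < ((pvUnion eq_1_set eq_2_set gt_2_set).foldl (fun d k => if gt_2_set.contains k then d.modify (pvFid k) 0 (· + 1) else d) (PySem.Dict.empty : PySem.Dict Int Int)).getD (pvFid key) 0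
      then (acc.1, acc.2.1, PySem.Set.add acc.2.2 key)
      else (PySem.Set.add acc.1 key, acc.2.1, acc.2.2)) := by
    funext acc key
    rw [pv_count1, pv_count2]
  have h2 : (fun (acc : List Int × List Int × List Int) key =>
      if (((((pvUnion eq_1_set eq_2_set gt_2_set).foldl (fun d k => d.modify (pvFid k) [] (fun s => s ++ [k])) PySem.Dict.empty).getD (pvFid key) []).filter (fun sf => eq_1_set.contains sf || eq_2_set.contains sf)).length : Int) < (((((pvUnion eq_1_set eq_2_set gt_2_set).foldl (fun d k => d.modify (pvFid k) [] (fun s => s ++ [k])) PySem.Dict.empty).getD (pvFid key) []).filter (fun sf => gt_2_set.contains sf)).length : Int)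
      then (acc.1, acc.2.1, PySem.Set.add acc.2.2 key)
      else (acc.1, PySem.Set.add acc.2.1 key, acc.2.2))
      = (fun (acc : List Int × List Int × List Int) key =>
      if ((pvUnion eq_1_set eq_2_set gt_2_set).foldl (fun d k => if eq_1_set.contains k || eq_2_set.contains k then d.modify (pvFid k) 0 (· + 1) else d) (PySem.Dict.empty : PySem.Dict Int Int)).getD (pvFid key) 0 < ((pvUnion eq_1_set eq_2_set gt_2_set).foldl (fun d k => if gt_2_set.contains k then d.modify (pvFid k) 0 (· + 1) else d) (PySem.Dict.empty : PySem.Dict Int Int)).getD (pvFid key) 0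
      then (acc.1, acc.2.1, PySem.Set.add acc.2.2 key)
      else (acc.1, PySem.Set.add acc.2.1 key, acc.2.2)) := by
    funext acc key
    rw [pv_count1, pv_count2]
  rw [h1, h2, pv_foldl_third]
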